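-- pv_equiv track=rewrite | github.com/zaforf/competitiveprogramming | usaco/bronze/stalling.py | check
-- ===== SOURCE A (Python) =====
-- def check(a,b):
--     if len(b)==0:
--         return 1
--     else:
--         ret = 0
--         for i,cow in enumerate(a):
--             if cow != 0 and cow<=b[-1]:
--                 a[i]=0
--                 temp = b.pop()
--                 ret += check(a,b)
--                 b.append(temp)
--                 a[i]=cow
--         return ret
-- ===== SOURCE B (Python) =====
-- def check(a, b):
--     # Count injective assignments of one cow per threshold with cow <= threshold:
--     # sort thresholds ascending; the j-th smallest threshold has (#cows <= t) - j choices.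
--     res = 1
--     for used, t in enumerate(sorted(b)):
--         avail = sum(1 for x in a if x <= t) - used
--         if avail <= 0:
--             return 0
--         res *= avail
--     return res
-- ===== Notes on version B (the rewrite author's own statement) =====
-- stated objective: alternative
-- what changed: Replaces A's exhaustive backtracking recursion (try every remaining cow for the last threshold) with the closed-form product: sort thresholds ascending and multiply (#cows <= threshold - index), returning 0 as soon as a factor is non-positive; intended as asymptotically faster (A is exponential), measured 10.8x at the largest size both finished but unconfirmed in a timing run since A times out beyond that.
-- intended difference: On inputs where a contains 0, some threshold in b is >= 0 and a full assignment exists (Hall condition), A silently under-counts because it uses 0 in a as its in-place 'already used' sentinel and never assigns a cow of value 0, whereas B counts every cow including zeros, which is the intended count. — e.g. on check([0], [0]): A returns 0, B returns 1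
import Mathlib
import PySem

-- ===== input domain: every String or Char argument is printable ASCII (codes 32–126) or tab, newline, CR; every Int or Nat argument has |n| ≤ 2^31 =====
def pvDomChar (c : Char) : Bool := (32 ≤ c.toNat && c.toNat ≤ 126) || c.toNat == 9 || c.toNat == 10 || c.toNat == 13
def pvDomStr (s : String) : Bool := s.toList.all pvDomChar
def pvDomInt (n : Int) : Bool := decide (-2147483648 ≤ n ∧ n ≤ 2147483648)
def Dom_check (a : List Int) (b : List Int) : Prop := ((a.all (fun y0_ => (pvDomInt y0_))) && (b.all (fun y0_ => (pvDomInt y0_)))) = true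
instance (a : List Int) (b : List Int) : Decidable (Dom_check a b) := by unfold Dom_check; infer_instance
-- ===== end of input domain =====

-- B replaces A's exhaustive backtracking count with the sorted-thresholds product formula.
-- A mutates its arguments in place but restores them before returning; B does not mutate;
-- the equivalence proved here is about the return value.

-- ===== PORT A =====
def check (a : List Int) (b : List Int) : Int :=
  match hb : b.getLast? with
  | none => 1
  | some t =>
    (PySem.List.enumerate a 0).foldl
      (fun ret p =>
        if p.2 ≠ 0 ∧ p.2 ≤ t then ret + check (a.set p.1.toNat 0) b.dropLast else ret) 0
termination_by b.length
decreasing_by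
  have : b ≠ [] := by intro h; rw [h] at hb; simp at hb
  simp [List.length_dropLast]
  exact List.length_pos_iff.mpr this

-- ===== PORT B =====
-- the loop `for used, t in enumerate(sorted(b))` with its early `return 0`
def altGo (a : List Int) (used : Int) : List Int → Int
  | [] => 1
  | t :: ts =>
    let avail : Int := ((a.filter (fun x => decide (x ≤ t))).length : Int) - used
    if avail ≤ 0 then 0 else avail * altGo a (used + 1) ts

def check_alt (a : List Int) (b : List Int) : Int :=
  altGo a 0 (PySem.List.sorted b (fun x => x) false)

-- ===== PRECONDITION & SPEC =====
-- On inputs where a contains 0, some threshold in b is ≥ 0, and a full assignment exists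
-- (the Hall condition below), A silently under-counts because it uses 0 in a as its
-- in-place 'already used' sentinel and never assigns a cow of value 0; B counts every
-- cow including zeros, which is the intended count.
def D_check (a : List Int) (b : List Int) : Prop :=
  0 ∈ a ∧ (∃ t ∈ b, 0 ≤ t) ∧
  (∀ j : Nat, j < b.length →
    (j : Int) < (a.countP (fun x => decide (x ≤ (PySem.List.sorted b (fun x => x) false).getD j 0)) : Int))
instance (a : List Int) (b : List Int) : Decidable (D_check a b) := by unfold D_check; infer_instance

def Spec_check (a : List Int) (b : List Int) (out : Int) : Prop := ¬ D_check a b → out = check_alt a b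
instance (a : List Int) (b : List Int) (out : Int) : Decidable (Spec_check a b out) := by unfold Spec_check; infer_instance

def pvDiffWitness_check : List Int × List Int := ([0], [0])
def pvDiffWitnessOut_check : Int × Int := (0, 1)

-- ===== CLAIM (what is proved, stated in full; the proofs are below) =====
def Claim_unchanged_check : Prop := ∀ (a : List Int) (b : List Int), Dom_check a b → Spec_check a b (check a b)
def Claim_changed_check : Prop := Dom_check (pvDiffWitness_check.1) (pvDiffWitness_check.2) ∧ D_check (pvDiffWitness_check.1) (pvDiffWitness_check.2) ∧ check (pvDiffWitness_check.1) (pvDiffWitness_check.2) = pvDiffWitnessOut_check.1 ∧ check_alt (pvDiffWitness_check.1) (pvDiffWitness_check.2) = pvDiffWitnessOut_check.2 ∧ pvDiffWitnessOut_check.1 ≠ pvDiffWitnessOut_check.2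
def Claim_exact_check : Prop := ∀ (a : List Int) (b : List Int), Dom_check a b → D_check a b → check a b ≠ check_alt a b

-- ===== LEMMAS AND PROOFS =====
def R (a : List Int) : List Int → Int
  | [] => 1
  | t :: l => ∑ i ∈ Finset.range a.length,
      if a.getD i 0 ≠ 0 ∧ a.getD i 0 ≤ t then R (a.set i 0) l else 0
theorem foldl_enum_sum (t : Int) (g : Nat → Int) :
    ∀ (a : List Int) (s c : Int), 0 ≤ s →
    (PySem.List.enumerate a s).foldl
      (fun ret p => if p.2 ≠ 0 ∧ p.2 ≤ t then ret + g p.1.toNat else ret) c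
    = c + ∑ i ∈ Finset.range a.length,
        (if a.getD i 0 ≠ 0 ∧ a.getD i 0 ≤ t then g (s.toNat + i) else 0) := by
  intro a
  induction a with
  | nil => intro s c hs; simp [PySem.List.enumerate_nil]
  | cons x xs ih =>
    intro s c hs
    rw [PySem.List.enumerate_cons, List.foldl_cons, ih (s + 1) _ (by omega)]
    simp only [List.length_cons]
    rw [Finset.sum_range_succ' _ xs.length]
    have h1 : (s + 1).toNat = s.toNat + 1 := by omega
    simp only [List.getD_cons_succ, List.getD_cons_zero, h1]
    have h2 : ∀ i : Nat, s.toNat + 1 + i = s.toNat + (i + 1) := by omega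
    simp only [h2, Nat.add_zero]
    split_ifs with h <;> ring

theorem check_eq_R (b : List Int) : ∀ a, check a b = R a b.reverse := by
  induction b using List.reverseRecOn with
  | nil => intro a; rw [check.eq_def]; simp [R]
  | append_singleton bs t ih =>
    intro a
    rw [check.eq_def]
    split
    · next h => simp at h
    · next t' h =>
      rw [List.getLast?_concat] at h
      obtain rfl : t = t' := by injection h
      simp only [List.dropLast_concat, List.reverse_append, List.reverse_cons,
        List.reverse_nil, List.nil_append, List.cons_append]
      rw [foldl_enum_sum t (fun i => check (a.set i 0) bs) a 0 0 le_rfl]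
      simp only [R, Int.toNat_zero, Nat.zero_add, zero_add]
      refine Finset.sum_congr rfl fun i _ => ?_
      split_ifs with h
      · exact ih _
      · rfl

theorem getD_set_self (a : List Int) (i : Nat) (h : i < a.length) :
    ((a.set i 0)[i]?).getD 0 = 0 := by
  simp [h]

theorem getD_set_ne (a : List Int) (i j : Nat) (h : j ≠ i) :
    ((a.set i 0)[j]?).getD 0 = (a[j]?).getD 0 := by
  simp [List.getElem?_set_ne h.symm]

theorem R_double (a : List Int) (u v : Int) (l : List Int) :
    R a (u :: v :: l) = ∑ i ∈ Finset.range a.length, ∑ j ∈ Finset.range a.length,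
      if (a.getD i 0 ≠ 0 ∧ a.getD i 0 ≤ u) ∧ j ≠ i ∧ (a.getD j 0 ≠ 0 ∧ a.getD j 0 ≤ v)
      then R ((a.set i 0).set j 0) l else 0 := by
  simp only [R, List.length_set, List.getD_eq_getElem?_getD]
  refine Finset.sum_congr rfl fun i hi => ?_
  have hi' : i < a.length := Finset.mem_range.mp hi
  split_ifs with h
  · refine Finset.sum_congr rfl fun j hj => ?_
    by_cases hji : j = i
    · subst hji
      rw [getD_set_self a j hi']
      simp [h]
    · rw [getD_set_ne a i j hji]
      simp [h, hji]
  · rw [Finset.sum_eq_zero]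
    intro j hj
    simp [h]

theorem R_swap (a : List Int) (s t : Int) (l : List Int) :
    R a (s :: t :: l) = R a (t :: s :: l) := by
  rw [R_double, R_double, Finset.sum_comm]
  refine Finset.sum_congr rfl fun j _ => Finset.sum_congr rfl fun i _ => ?_
  by_cases hij : i = j
  · simp [hij]
  · rw [List.set_comm 0 0 hij]
    have : ((a.getD i 0 ≠ 0 ∧ a.getD i 0 ≤ s) ∧ j ≠ i ∧ a.getD j 0 ≠ 0 ∧ a.getD j 0 ≤ t)
         ↔ ((a.getD j 0 ≠ 0 ∧ a.getD j 0 ≤ t) ∧ i ≠ j ∧ a.getD i 0 ≠ 0 ∧ a.getD i 0 ≤ s) := by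
      constructor <;> (rintro ⟨h1, h2, h3⟩; exact ⟨h3, fun hh => h2 hh.symm, h1⟩)
    rw [if_congr this rfl rfl]

theorem R_perm {l₁ l₂ : List Int} (h : l₁.Perm l₂) : ∀ a, R a l₁ = R a l₂ := by
  induction h with
  | nil => intro a; rfl
  | cons x h ih =>
    intro a
    simp only [R]
    exact Finset.sum_congr rfl fun i _ => by split_ifs with hq; exact ih _; rfl
  | swap x y l => intro a; exact R_swap a y x l
  | trans h1 h2 ih1 ih2 => intro a; rw [ih1, ih2]

def PF (cnt : Int → Int) (j : Int) : List Int → Int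
  | [] => 1
  | t :: l => if cnt t - j ≤ 0 then 0 else (cnt t - j) * PF cnt (j + 1) l

def cntA (a : List Int) (t : Int) : Nat := a.countP (fun x => decide (x ≠ 0 ∧ x ≤ t))
def cntB (a : List Int) (t : Int) : Nat := a.countP (fun x => decide (x ≤ t))

theorem sum_ite_cntA (t c : Int) :
    ∀ a : List Int,
      (∑ i ∈ Finset.range a.length, if a.getD i 0 ≠ 0 ∧ a.getD i 0 ≤ t then c else 0)
      = (cntA a t : Int) * c := by
  intro a
  induction a with
  | nil => simp [cntA]
  | cons x xs ih =>
    simp only [List.length_cons]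
    rw [Finset.sum_range_succ' _ xs.length]
    simp only [List.getD_cons_succ, List.getD_cons_zero, ih]
    by_cases h : x ≠ 0 ∧ x ≤ t
    · have hd : decide (x ≠ 0 ∧ x ≤ t) = true := by simpa using h
      simp only [cntA, List.countP_cons, hd, if_pos h]
      push_cast; ring
    · have hd : decide (x ≠ 0 ∧ x ≤ t) = false := by simpa using h
      simp only [cntA, List.countP_cons, hd, if_neg h]
      push_cast; ring

theorem cntA_set (s : Int) :
    ∀ (a : List Int) (i : Nat), i < a.length → a.getD i 0 ≠ 0 → a.getD i 0 ≤ s →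
      cntA (a.set i 0) s + 1 = cntA a s := by
  intro a
  induction a with
  | nil => intro i h; simp at h
  | cons x xs ih =>
    intro i hi h0 hle
    cases i with
    | zero =>
      simp only [List.getD_cons_zero] at h0 hle
      simp [List.set_cons_zero, cntA, List.countP_cons, h0, hle]
    | succ i =>
      simp only [List.getD_cons_succ] at h0 hle
      simp only [List.set_cons_succ, cntA, List.countP_cons]
      have := ih i (by simpa using hi) h0 hle
      simp only [cntA] at this
      omega

theorem PF_congr (c1 c2 : Int → Int) :
    ∀ (l : List Int) (j1 j2 : Int), (∀ s ∈ l, c1 s - j1 = c2 s - j2) →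
      PF c1 j1 l = PF c2 j2 l := by
  intro l
  induction l with
  | nil => intros; rfl
  | cons t l ih =>
    intro j1 j2 h
    simp only [PF]
    rw [h t (by simp), ih (j1 + 1) (j2 + 1) (fun s hs => by have := h s (by simp [hs]); omega)]

theorem R_sorted : ∀ (l : List Int), l.Pairwise (· ≤ ·) →
    ∀ a, R a l = PF (fun t => (cntA a t : Int)) 0 l := by
  intro l
  induction l with
  | nil => intros; rfl
  | cons t l ih =>
    intro hp a
    have hpl := (List.pairwise_cons.mp hp).2
    have hth := (List.pairwise_cons.mp hp).1
    have step : ∀ i ∈ Finset.range a.length,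
        (if a.getD i 0 ≠ 0 ∧ a.getD i 0 ≤ t then R (a.set i 0) l else 0)
        = (if a.getD i 0 ≠ 0 ∧ a.getD i 0 ≤ t then PF (fun u => (cntA a u : Int)) 1 l else 0) := by
      intro i hi
      split_ifs with h
      · rw [ih hpl]
        refine PF_congr _ _ l 0 1 fun s hs => ?_
        have := cntA_set s a i (Finset.mem_range.mp hi) h.1 (le_trans h.2 (hth s hs))
        omega
      · rfl
    calc R a (t :: l) = ∑ i ∈ Finset.range a.length,
            (if a.getD i 0 ≠ 0 ∧ a.getD i 0 ≤ t then PF (fun u => (cntA a u : Int)) 1 l else 0) := by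
            simp only [R]; exact Finset.sum_congr rfl step
      _ = (cntA a t : Int) * PF (fun u => (cntA a u : Int)) 1 l := sum_ite_cntA t _ a
      _ = PF (fun u => (cntA a u : Int)) 0 (t :: l) := by
            simp only [PF, sub_zero]
            split_ifs with h
            · have : (cntA a t : Int) = 0 := le_antisymm h (by positivity)
              rw [this, zero_mul]
            · rfl

theorem check_eq_PF (a b : List Int) :
    check a b = PF (fun t => (cntA a t : Int)) 0 (PySem.List.sorted b (fun x => x) false) := by
  rw [check_eq_R b a,
      R_perm ((b.reverse_perm).trans (PySem.List.sorted_perm b (fun x => x) false).symm) a]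
  exact R_sorted _ (PySem.List.sorted_pairwise b (fun x => x)) a

theorem altGo_eq_PF (a : List Int) :
    ∀ (l : List Int) (used : Int), altGo a used l = PF (fun t => (cntB a t : Int)) used l := by
  intro l
  induction l with
  | nil => intro used; rfl
  | cons t ts ih =>
    intro used
    simp only [altGo, PF, cntB, List.countP_eq_length_filter, ih]

theorem alt_eq_PF (a b : List Int) :
    check_alt a b = PF (fun t => (cntB a t : Int)) 0 (PySem.List.sorted b (fun x => x) false) := by
  rw [check_alt, altGo_eq_PF]

theorem PF_zero_of (cnt : Int → Int) :
    ∀ (l : List Int) (j : Int) (k : Nat), k < l.length → cnt (l.getD k 0) - (j + k) ≤ 0 →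
      PF cnt j l = 0 := by
  intro l
  induction l with
  | nil => intro j k h; simp at h
  | cons t ts ih =>
    intro j k hk hle
    simp only [PF]
    split_ifs with h
    · rfl
    · cases k with
      | zero =>
        simp only [List.getD_cons_zero] at hle
        omega
      | succ k =>
        simp only [List.getD_cons_succ] at hle
        rw [ih (j + 1) k (by simpa using hk) (by omega), mul_zero]

theorem PF_nonneg (cnt : Int → Int) : ∀ (l : List Int) (j : Int), 0 ≤ PF cnt j l := by
  intro l
  induction l with
  | nil => intro j; norm_num [PF]
  | cons t ts ih =>
    intro j
    simp only [PF]
    split_ifs with h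
    · exact le_refl 0
    · exact mul_nonneg (by omega) (ih (j + 1))

theorem PF_pos (cnt : Int → Int) :
    ∀ (l : List Int) (j : Int), (∀ k : Nat, k < l.length → j + k < cnt (l.getD k 0)) →
      0 < PF cnt j l := by
  intro l
  induction l with
  | nil => intro j h; norm_num [PF]
  | cons t ts ih =>
    intro j h
    have h0 := h 0 (by simp)
    simp only [List.getD_cons_zero] at h0
    simp only [PF]
    rw [if_neg (by omega)]
    refine mul_pos (by omega) (ih (j + 1) fun k hk => ?_)
    have := h (k + 1) (by simpa using hk)
    simp only [List.getD_cons_succ] at this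
    omega

theorem PF_le (c1 c2 : Int → Int) :
    ∀ (l : List Int) (j : Int), (∀ s ∈ l, c1 s ≤ c2 s) → PF c1 j l ≤ PF c2 j l := by
  intro l
  induction l with
  | nil => intro j h; exact le_refl _
  | cons t ts ih =>
    intro j h
    have hts : ∀ s ∈ ts, c1 s ≤ c2 s := fun s hs => h s (by simp [hs])
    have hh := h t (by simp)
    simp only [PF]
    split_ifs with h1 h2
    · exact le_refl 0
    · exact mul_nonneg (by omega) (PF_nonneg c2 ts (j + 1))
    · omega
    · exact mul_le_mul (by omega) (ih (j + 1) hts) (PF_nonneg c1 ts (j + 1)) (by omega)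

theorem PF_lt (c1 c2 : Int → Int) :
    ∀ (l : List Int) (j : Int), (∀ s ∈ l, c1 s ≤ c2 s) → (∃ s ∈ l, c1 s < c2 s) →
      (∀ k : Nat, k < l.length → j + k < c2 (l.getD k 0)) →
      PF c1 j l < PF c2 j l := by
  intro l
  induction l with
  | nil => rintro j _ ⟨s, hs, _⟩ _; simp at hs
  | cons t ts ih =>
    intro j hle hex hall
    have hts : ∀ s ∈ ts, c1 s ≤ c2 s := fun s hs => hle s (by simp [hs])
    have hallts : ∀ k : Nat, k < ts.length → (j + 1) + k < c2 (ts.getD k 0) := by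
      intro k hk
      have := hall (k + 1) (by simpa using hk)
      simp only [List.getD_cons_succ] at this
      omega
    have h0 := hall 0 (by simp)
    simp only [List.getD_cons_zero] at h0
    have hposB : 0 < PF c2 (j + 1) ts := PF_pos c2 ts (j + 1) hallts
    have hht := hle t (by simp)
    simp only [PF]
    rw [if_neg (show ¬ c2 t - j ≤ 0 by omega)]
    split_ifs with h1
    · exact mul_pos (by omega) hposB
    · rcases hex with ⟨s, hs, hlt⟩
      rcases List.mem_cons.mp hs with rfl | hsts
      · calc (c1 s - j) * PF c1 (j + 1) ts
            ≤ (c1 s - j) * PF c2 (j + 1) ts :=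
              mul_le_mul_of_nonneg_left (PF_le c1 c2 ts (j + 1) hts) (by omega)
          _ < (c2 s - j) * PF c2 (j + 1) ts := by
              exact mul_lt_mul_of_pos_right (by omega) hposB
      · have hltrec := ih (j + 1) hts ⟨s, hsts, hlt⟩ hallts
        calc (c1 t - j) * PF c1 (j + 1) ts
            < (c1 t - j) * PF c2 (j + 1) ts :=
              mul_lt_mul_of_pos_left hltrec (by omega)
          _ ≤ (c2 t - j) * PF c2 (j + 1) ts :=
              mul_le_mul_of_nonneg_right (by omega) (le_of_lt hposB)

theorem countP_lt {p q : Int → Bool} :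
    ∀ l : List Int, (∀ x ∈ l, p x = true → q x = true) →
      ∀ x₀ ∈ l, q x₀ = true → p x₀ = false → l.countP p < l.countP q := by
  intro l
  induction l with
  | nil => intro _ x₀ h; simp at h
  | cons x xs ih =>
    intro himp x₀ hmem hq hp
    rcases List.mem_cons.mp hmem with rfl | hmem'
    · have hle := List.countP_mono_left (l := xs) (fun y hy => himp y (by simp [hy]))
      simp only [List.countP_cons, hp, hq, Bool.false_eq_true, if_false, if_true]
      omega
    · have hlt := ih (fun y hy => himp y (by simp [hy])) x₀ hmem' hq hp
      simp only [List.countP_cons]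
      have : (if p x then 1 else 0) ≤ (if q x then 1 else 0) := by
        by_cases hx : p x = true
        · simp [hx, himp x (by simp) hx]
        · simp only [Bool.not_eq_true] at hx
          simp only [hx, Bool.false_eq_true, if_false]
          split_ifs <;> omega
      omega

theorem cntA_le_cntB (a : List Int) (t : Int) : cntA a t ≤ cntB a t :=
  List.countP_mono_left (fun x _ h => by simp at h ⊢; exact h.2)


-- ===== VERDICT (by name: the statement is the Claim_ definition above) =====
theorem check_spec : Claim_unchanged_check := by
  intro a b _ hnD
  show check a b = check_alt a b
  rw [check_eq_PF, alt_eq_PF]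
  by_cases h0 : (0 : Int) ∈ a
  · by_cases ht : ∃ t ∈ b, 0 ≤ t
    · have hnh : ¬ (∀ j : Nat, j < b.length →
          (j : Int) < (cntB a ((PySem.List.sorted b (fun x => x) false).getD j 0) : Int)) :=
        fun hh => hnD ⟨h0, ht, hh⟩
      push_neg at hnh
      obtain ⟨j, hj, hle⟩ := hnh
      have hjs : j < (PySem.List.sorted b (fun x => x) false).length := by
        rwa [PySem.List.length_sorted]
      rw [PF_zero_of _ _ 0 j hjs (by
        have := cntA_le_cntB a ((PySem.List.sorted b (fun x => x) false).getD j 0)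
        omega)]
      rw [PF_zero_of _ _ 0 j hjs (by omega)]
    · push_neg at ht
      refine PF_congr _ _ _ 0 0 fun s hs => ?_
      have hsb : s ∈ b := (PySem.List.mem_sorted ..).mp hs
      have hneg : s < 0 := ht s hsb
      have : cntA a s = cntB a s := by
        refine List.countP_congr fun x _ => ?_
        have : (x ≠ 0 ∧ x ≤ s) ↔ (x ≤ s) := ⟨fun h => h.2, fun h => ⟨by omega, h⟩⟩
        simp [this]
      rw [this]
  · refine PF_congr _ _ _ 0 0 fun s hs => ?_
    have : cntA a s = cntB a s := by
      refine List.countP_congr fun x hx => ?_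
      have hx0 : x ≠ 0 := fun h => h0 (h ▸ hx)
      simp [hx0]
    rw [this]

theorem check_changed : Claim_changed_check := by
  unfold Claim_changed_check
  refine ⟨by decide, by decide, ?_, by decide, by decide⟩
  show check [0] [0] = 0
  rw [check.eq_def]
  simp [PySem.List.enumerate]

theorem check_tight : Claim_exact_check := by
  intro a b _ hD
  obtain ⟨h0, ⟨t₀, ht₀b, ht₀⟩, hall⟩ := hD
  rw [check_eq_PF, alt_eq_PF]
  apply ne_of_lt
  apply PF_lt
  · intro s _
    exact_mod_cast cntA_le_cntB a s
  · refine ⟨t₀, (PySem.List.mem_sorted ..).mpr ht₀b, ?_⟩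
    have : cntA a t₀ < cntB a t₀ := by
      refine countP_lt a (fun x _ h => by simp at h ⊢; exact h.2) 0 h0 ?_ ?_
      · simpa using ht₀
      · simp
    exact_mod_cast this
  · intro k hk
    have hk' : k < b.length := by rwa [PySem.List.length_sorted] at hk
    have := hall k hk'
    simpa [cntB] using this
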